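-- pv_equiv track=rewrite | github.com/idansherman/final_project | utils/text_utils.py | extract_people_from_sentences
-- ===== SOURCE A (Python) =====
-- def extract_people_from_sentences(sentences, all_names, name_variations):
--     """
--     Extracts people mentions from sentences based on a prebuilt name lookup.
--
--     :param sentences: List of tokenized sentences.
--     :param all_names: Set of all known names and variations.
--     :param name_variations: Dictionary mapping variations to full names.
--     :return: List of sets where each set contains detected names for a sentence.
--     """
--     sentence_people = [set() for _ in sentences]
--
--     for i, sentence in enumerate(sentences):
--         for word in sentence:
--             if word in all_names:  # If the word is a known name
--                 matched_names = set()  # Collect all possible full names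
--
--                 # Retrieve all names containing this word
--                 for name in all_names:
--                     if word in name.split():  # Match partial words inside full names
--                         matched_names.add(name)
--
--                 # Ensure the exact name itself is included
--                 if word in name_variations:
--                     matched_names.add(word)
--
--                 # Add all matches to the sentence
--                 sentence_people[i].update(matched_names)
--
--     return sentence_people
-- ===== SOURCE B (Python) =====
-- def extract_people_from_sentences(sentences, all_names, name_variations):
--     """Index-based rewrite: build a token -> [containing names] index once,
--     then each word is an O(1) lookup instead of a scan over all names."""
--     pairs = [(tok, name) for name in all_names for tok in name.split()]
--     token_index = {}
--     for tok, name in pairs: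
--         token_index.setdefault(tok, []).append(name)
--
--     result = []
--     for sentence in sentences:
--         people = set()
--         for word in sentence:
--             if word in all_names:
--                 people.update(token_index.get(word, []))
--                 if word in name_variations:
--                     people.add(word)
--         result.append(people)
--     return result
-- ===== Notes on version B (the rewrite author's own statement) =====
-- stated objective: faster
-- what changed: B builds a token-to-containing-names index dictionary once up front, so each sentence word needs only one dictionary lookup instead of A's inner scan over all names with a re-split of every name.
import Mathlib
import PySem

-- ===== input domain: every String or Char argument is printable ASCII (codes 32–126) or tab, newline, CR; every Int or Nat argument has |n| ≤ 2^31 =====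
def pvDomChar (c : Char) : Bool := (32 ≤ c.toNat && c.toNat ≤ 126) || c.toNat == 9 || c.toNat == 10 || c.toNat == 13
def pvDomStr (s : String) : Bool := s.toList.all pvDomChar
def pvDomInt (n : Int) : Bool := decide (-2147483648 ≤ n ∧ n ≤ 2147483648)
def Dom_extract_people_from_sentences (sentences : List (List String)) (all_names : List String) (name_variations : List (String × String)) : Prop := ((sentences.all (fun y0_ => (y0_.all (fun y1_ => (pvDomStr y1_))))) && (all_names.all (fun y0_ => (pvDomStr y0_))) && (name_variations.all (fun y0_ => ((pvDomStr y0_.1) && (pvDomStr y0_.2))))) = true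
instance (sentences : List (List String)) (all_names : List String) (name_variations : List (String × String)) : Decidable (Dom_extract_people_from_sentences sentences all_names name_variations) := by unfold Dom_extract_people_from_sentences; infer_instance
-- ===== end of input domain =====

-- B replaces A's per-word scan over all names by a token→names index built once (objective: faster).

-- ===== PORT A =====
-- Literal port of A: per word, an inner scan over all_names collects every name
-- whose split contains the word ('word in name.split()'), plus the word itself
-- when it is a key of name_variations; the sentence set is updated with that set.
def extract_people_from_sentences (sentences : List (List String)) (all_names : List String) (name_variations : List (String × String)) : List (List String) :=
  sentences.map (fun sentence =>
    sentence.foldl (fun people word =>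
      if all_names.contains word then
        let matched_names : PySem.Set String :=
          all_names.foldl (fun m name =>
            if (PySem.Str.split₀ name).contains word then PySem.Set.add m name else m)
            PySem.Set.empty
        let matched_names :=
          if name_variations.any (fun p => p.1 == word) then PySem.Set.add matched_names word
          else matched_names
        PySem.Set.update people matched_names
      else people) PySem.Set.empty)

-- ===== PORT B =====
-- '[(tok, name) for name in all_names for tok in name.split()]'
def pvTokenPairs (all_names : List String) : List (String × String) :=
  all_names.flatMap (fun name => (PySem.Str.split₀ name).map (fun tok => (tok, name)))

-- 'token_index.setdefault(tok, []).append(name)' is exactly Dict.modify tok [] (· ++ [name]):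
-- an existing key keeps its position and grows its list, a new key is appended at the end.
def pvTokenIndex (all_names : List String) : PySem.Dict String (List String) :=
  (pvTokenPairs all_names).foldl (fun d p => d.modify p.1 [] (fun l => l ++ [p.2])) PySem.Dict.empty

def extract_people_from_sentences_alt (sentences : List (List String)) (all_names : List String) (name_variations : List (String × String)) : List (List String) :=
  let token_index := pvTokenIndex all_names
  sentences.map (fun sentence =>
    sentence.foldl (fun people word =>
      if all_names.contains word then
        let people := PySem.Set.update people (token_index.getD word [])
        if name_variations.any (fun p => p.1 == word) then PySem.Set.add people word
        else people
      else people) PySem.Set.empty)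

-- ===== PRECONDITION & SPEC =====
def Spec_extract_people_from_sentences (sentences : List (List String)) (all_names : List String) (name_variations : List (String × String)) (out : List (List String)) : Prop := out = extract_people_from_sentences_alt sentences all_names name_variations
instance (sentences : List (List String)) (all_names : List String) (name_variations : List (String × String)) (out : List (List String)) : Decidable (Spec_extract_people_from_sentences sentences all_names name_variations out) := by unfold Spec_extract_people_from_sentences; infer_instance

-- ===== CLAIM (what is proved, stated in full; the proofs are below) =====
def Claim_equal_extract_people_from_sentences : Prop := ∀ (sentences : List (List String)) (all_names : List String) (name_variations : List (String × String)), Dom_extract_people_from_sentences sentences all_names name_variations → Spec_extract_people_from_sentences sentences all_names name_variations (extract_people_from_sentences sentences all_names name_variations)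

-- ===== LEMMAS AND PROOFS =====

-- update with (m.add x) = update with m, then add x
lemma pv_update_add (acc m : PySem.Set String) (x : String) :
    PySem.Set.update acc (PySem.Set.add m x) = PySem.Set.add (PySem.Set.update acc m) x := by
  by_cases hx : x ∈ m
  · rw [PySem.Set.add_of_mem hx,
        PySem.Set.add_of_mem ((PySem.Set.mem_update acc m x).mpr (Or.inr hx))]
  · rw [PySem.Set.add_of_not_mem hx, PySem.Set.update_append, PySem.Set.update_cons,
        PySem.Set.update_nil]

-- adding the same element repeatedly is idempotent
lemma pv_update_replicate_add (k : Nat) (s : PySem.Set String) (x : String) :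
    PySem.Set.update (PySem.Set.add s x) (List.replicate k x) = PySem.Set.add s x := by
  induction k generalizing s with
  | zero => rw [List.replicate_zero, PySem.Set.update_nil]
  | succ k ih =>
      rw [List.replicate_succ, PySem.Set.update_cons,
          PySem.Set.add_of_mem ((PySem.Set.mem_add s x x).mpr (Or.inr rfl))]
      exact ih s

-- the heart: updating with B's index entry for `word` equals updating with A's
-- conditionally-built matched set, for any seed m and accumulator acc
lemma pv_key (word : String) (names : List String) (m acc : PySem.Set String) :
    PySem.Set.update (PySem.Set.update acc m)
      (((pvTokenPairs names).filter (fun p => p.1 == word)).map (fun p => p.2)) =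
    PySem.Set.update acc
      (names.foldl (fun m name =>
        if (PySem.Str.split₀ name).contains word then PySem.Set.add m name else m) m) := by
  induction names generalizing m with
  | nil => simp [pvTokenPairs, PySem.Set.update_nil]
  | cons n rest ih =>
      have hblk : (((PySem.Str.split₀ n).map (fun tok => (tok, n))).filter
            (fun p => p.1 == word)).map (fun p => p.2) =
          List.replicate ((PySem.Str.split₀ n).filter (fun t => t == word)).length n := by
        simp [List.filter_map, List.map_map, Function.comp_def, List.map_const']
      simp only [pvTokenPairs, List.flatMap_cons, List.filter_append, List.map_append]
      rw [PySem.Set.update_append, hblk]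
      by_cases hc : (PySem.Str.split₀ n).contains word
      · have hmem : word ∈ PySem.Str.split₀ n := by simpa using hc
        have hne : ((PySem.Str.split₀ n).filter (fun t => t == word)) ≠ [] :=
          List.ne_nil_of_mem (List.mem_filter.mpr ⟨hmem, by simp⟩)
        obtain ⟨k, hk⟩ := Nat.exists_eq_succ_of_ne_zero
          (fun h => hne (List.eq_nil_of_length_eq_zero h))
        rw [hk, List.replicate_succ, PySem.Set.update_cons, pv_update_replicate_add,
            ← pv_update_add]
        have := ih (PySem.Set.add m n)
        simp only [pvTokenPairs] at this
        rw [this, List.foldl_cons, if_pos hc]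
      · have hmem : word ∉ PySem.Str.split₀ n := by simpa using hc
        have hnil : ((PySem.Str.split₀ n).filter (fun t => t == word)) = [] := by
          refine List.filter_eq_nil_iff.mpr (fun t ht => ?_)
          simp only [beq_iff_eq]
          rintro rfl; exact hmem ht
        rw [hnil]
        simp only [List.length_nil, List.replicate_zero, PySem.Set.update_nil]
        have := ih m
        simp only [pvTokenPairs] at this
        rw [this, List.foldl_cons, if_neg hc]

-- B's index lookup is exactly the list of names whose tokenisation contains `word`
lemma pv_index_getD (all_names : List String) (word : String) :
    (pvTokenIndex all_names).getD word [] =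
      ((pvTokenPairs all_names).filter (fun p => p.1 == word)).map (fun p => p.2) := by
  unfold pvTokenIndex
  rw [PySem.Dict.getD_foldl_modify_append]
  simp [PySem.Dict.getD, PySem.Dict.get?, PySem.Dict.empty]

-- ===== VERDICT (by name: the statement is the Claim_ definition above) =====
theorem extract_people_from_sentences_spec : Claim_equal_extract_people_from_sentences := by
  intro sentences all_names name_variations _dom
  unfold Spec_extract_people_from_sentences extract_people_from_sentences
    extract_people_from_sentences_alt
  have hstep : (fun (people : PySem.Set String) (word : String) =>
      if all_names.contains word then
        let matched_names : PySem.Set String :=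
          all_names.foldl (fun m name =>
            if (PySem.Str.split₀ name).contains word then PySem.Set.add m name else m)
            PySem.Set.empty
        let matched_names :=
          if name_variations.any (fun p => p.1 == word) then PySem.Set.add matched_names word
          else matched_names
        PySem.Set.update people matched_names
      else people) =
      (fun (people : PySem.Set String) (word : String) =>
      if all_names.contains word then
        let people := PySem.Set.update people ((pvTokenIndex all_names).getD word [])
        if name_variations.any (fun p => p.1 == word) then PySem.Set.add people word
        else people
      else people) := by
    funext people word
    by_cases hw : all_names.contains word
    · simp only [hw, if_true]
      have hbase : PySem.Set.update people ((pvTokenIndex all_names).getD word []) =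
          PySem.Set.update people
            (all_names.foldl (fun m name =>
              if (PySem.Str.split₀ name).contains word then PySem.Set.add m name else m)
              PySem.Set.empty) := by
        rw [pv_index_getD]
        have h := pv_key word all_names PySem.Set.empty people
        rw [PySem.Set.empty_eq, PySem.Set.update_nil] at h
        exact h
      by_cases hv : name_variations.any (fun p => p.1 == word)
      · simp only [hv, if_true, hbase, pv_update_add]
      · simp [hv, hbase]
    · have hw' : word ∉ all_names := by simpa using hw
      simp [hw']
  rw [hstep]
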